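-- pv_equiv track=rewrite | github.com/FTdiscovery/trx1 | GENERATE_PRED.py | get_company_names
-- ===== SOURCE A (Python) =====
-- def get_ticker_index(ticker, words):
--     for i in range(len(words)):
--         if ticker in words[i]:
--             return i
--     return -1
--
-- def get_company_names(tickers, s):
--     company_names = []
--     all_words = s.split()
--
--     for ticker in tickers:
--         # Find the capitalized words that come before ticker in the string s
--         ticker_index = get_ticker_index(ticker, all_words)
--
--         words = all_words[:ticker_index]
--
--         company_name = []
--         for i in range(len(words) - 1, max(-1, len(words) - 3), -1):
--             if any([t in words[i] for t in tickers]):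
--                 break
--             if words[i][0].isupper():
--                 company_name.append(words[i])
--             else:
--                 break
--
--         company_names.append(' '.join(reversed(company_name)))
--     return company_names
-- ===== SOURCE B (Python) =====
-- def get_company_names(tickers, s):
--     all_words = s.split()
--
--     def name_before(ticker):
--         idx = next((i for i, w in enumerate(all_words) if ticker in w), -1)
--         run = []
--         for w in all_words[:idx][-2:]:
--             if any(t in w for t in tickers) or not w[0].isupper():
--                 run = []
--             else:
--                 run.append(w)
--         return ' '.join(run)
--
--     return [name_before(t) for t in tickers]
-- ===== Notes on version B (the rewrite author's own statement) =====
-- stated objective: simpler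
-- what changed: The backward scan-break-then-reverse over descending indices is replaced by a forward reset-on-bad-word pass over the two-word slice before the ticker (no index arithmetic, no reversal), the index-returning helper loop by a first-match over enumerate, and the outer append loop by a comprehension.
import Mathlib
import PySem

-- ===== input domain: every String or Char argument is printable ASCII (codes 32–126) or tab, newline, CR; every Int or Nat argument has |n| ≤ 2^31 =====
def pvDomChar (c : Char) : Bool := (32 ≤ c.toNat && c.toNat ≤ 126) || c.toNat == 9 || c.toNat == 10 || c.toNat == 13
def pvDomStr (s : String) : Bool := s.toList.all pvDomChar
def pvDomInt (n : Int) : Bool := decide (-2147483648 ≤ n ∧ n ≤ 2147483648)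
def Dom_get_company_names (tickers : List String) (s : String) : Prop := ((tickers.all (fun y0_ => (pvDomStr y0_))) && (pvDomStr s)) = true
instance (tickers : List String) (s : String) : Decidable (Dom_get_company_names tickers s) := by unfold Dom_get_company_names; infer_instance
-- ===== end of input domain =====

-- ===== PORT A =====
-- B replaces A's backward scan-break-reverse with a forward reset pass over the
-- two-word slice before the ticker (objective: simpler; same asymptotic cost).

-- w[0].isupper() for a split() word (split words are nonempty, so the none arm is unreachable)
def pvFirstUpper (w : String) : Bool :=
  match PySem.Str.pyGet? w 0 with
  | some c => PySem.Chars.isupper c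
  | none => false

-- get_ticker_index: 'for i in range(len(words)): if ticker in words[i]: return i' / 'return -1'
def pvGtiAux (ticker : String) : List String → Int → Int
  | [], _ => -1
  | w :: rest, i => if PySem.Str.isIn ticker w then i else pvGtiAux ticker rest (i + 1)

-- the inner backward loop of A: indices descend, break = stop returning acc
def pvALoop (tickers : List String) (words : List String) : List Int → List String → List String
  | [], acc => acc
  | i :: rest, acc =>
    let w := PySem.List.pyGetD words i ""      -- i is always in range along A's index list
    if tickers.any (fun t => PySem.Str.isIn t w) then acc      -- break
    else if pvFirstUpper w then pvALoop tickers words rest (acc ++ [w])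
    else acc                                                   -- break

def get_company_names (tickers : List String) (s : String) : List String :=
  let all_words := PySem.Str.split₀ s
  tickers.foldl (fun company_names ticker =>
    let ticker_index := pvGtiAux ticker all_words 0
    let words := PySem.List.slice all_words none (some ticker_index)
    let n : Int := (words.length : Int)
    let company_name :=
      pvALoop tickers words (PySem.List.pyRange (n - 1) (max (-1) (n - 3)) (-1)) []
    company_names ++ [PySem.Str.join " " company_name.reverse]) []

-- ===== PORT B =====
-- one step of B's forward pass: reset the run on a bad word, extend it on a good one
def pvBStep (tickers : List String) (run : List String) (w : String) : List String :=
  if tickers.any (fun t => PySem.Str.isIn t w) || !pvFirstUpper w then []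
  else run ++ [w]

-- next((i for i, w in enumerate(all_words) if ticker in w), -1)
def pvNextIdx (ticker : String) (all_words : List String) : Int :=
  match (PySem.List.enumerate all_words 0).find? (fun p => PySem.Str.isIn ticker p.2) with
  | some p => p.1
  | none => -1

def pvNameBefore (tickers : List String) (all_words : List String) (ticker : String) : String :=
  let idx := pvNextIdx ticker all_words
  let window := PySem.List.slice (PySem.List.slice all_words none (some idx)) (some (-2)) none
  PySem.Str.join " " (window.foldl (pvBStep tickers) [])

def get_company_names_alt (tickers : List String) (s : String) : List String :=
  let all_words := PySem.Str.split₀ s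
  tickers.map (pvNameBefore tickers all_words)

-- ===== PRECONDITION & SPEC =====
def Spec_get_company_names (tickers : List String) (s : String) (out : List String) : Prop := out = get_company_names_alt tickers s
instance (tickers : List String) (s : String) (out : List String) : Decidable (Spec_get_company_names tickers s out) := by unfold Spec_get_company_names; infer_instance

-- ===== CLAIM (what is proved, stated in full; the proofs are below) =====
def Claim_equal_get_company_names : Prop := ∀ (tickers : List String) (s : String), Dom_get_company_names tickers s → Spec_get_company_names tickers s (get_company_names tickers s)

-- ===== LEMMAS AND PROOFS =====

-- the two ticker-locating loops agree
theorem pvGti_eq_nextIdx (ticker : String) (ws : List String) (i : Int) :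
    pvGtiAux ticker ws i =
      (match (PySem.List.enumerate ws i).find? (fun p => PySem.Str.isIn ticker p.2) with
       | some p => p.1
       | none => -1) := by
  induction ws generalizing i with
  | nil => simp [pvGtiAux, PySem.List.enumerate_nil]
  | cons w rest ih =>
    simp only [pvGtiAux, PySem.List.enumerate_cons, List.find?_cons]
    by_cases h : PySem.Chars.isIn ticker.toList w.toList = true
    · simp [h]
    · simp [h, ih]

-- the core per-ticker agreement: A's backward break loop, reversed,
-- equals B's forward reset pass over words[-2:]
theorem pvCore_eq (tickers : List String) (words : List String) :
    (pvALoop tickers words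
        (PySem.List.pyRange ((words.length : Int) - 1)
          (max (-1) ((words.length : Int) - 3)) (-1)) []).reverse =
      (PySem.List.slice words (some (-2)) none).foldl (pvBStep tickers) [] := by
  rw [PySem.List.slice_from_neg_ofNat words 2 (by omega)]
  match h : words.reverse with
  | [] =>
    rw [List.reverse_eq_nil_iff] at h; subst h
    simp [pvALoop]
  | [b] =>
    have hw : words = [b] := by rw [← List.reverse_reverse words, h]; rfl
    subst hw
    have hr : PySem.List.pyRange ((([b] : List String).length : Int) - 1)
        (max (-1) ((([b] : List String).length : Int) - 3)) (-1) = [0] := by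
      rw [show ((([b] : List String).length : Int) - 1) = (0 : Int) by simp]
      rw [show (max (-1) ((([b] : List String).length : Int) - 3)) = (-1 : Int) by simp]
      rw [PySem.List.pyRange_neg_one_cons (by norm_num),
          PySem.List.pyRange_neg_one_eq_nil (by norm_num)]
    rw [hr, show ([b] : List String).length - 2 = 0 by simp, List.drop_zero]
    simp only [pvALoop, pvBStep, PySem.List.pyGetD_zero_cons, List.foldl_cons, List.foldl_nil]
    cases h1 : tickers.any (fun t => PySem.Str.isIn t b) <;>
      cases h2 : pvFirstUpper b <;>
        simp [h1, h2]
  | b :: a :: l =>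
    have hw : words = l.reverse ++ [a, b] := by
      rw [← List.reverse_reverse words, h]; simp
    subst hw
    have hlen : (l.reverse ++ [a, b]).length = l.length + 2 := by simp
    have hga : PySem.List.pyGetD (l.reverse ++ [a, b]) (((l.reverse ++ [a, b]).length : Int) - 2) "" = a := by
      rw [show (((l.reverse ++ [a, b]).length : Int) - 2) = ((l.length : Nat) : Int) by rw [hlen]; push_cast; ring]
      simp [List.getD_eq_getElem?_getD, List.getElem?_append_right]
    have hgb : PySem.List.pyGetD (l.reverse ++ [a, b]) (((l.reverse ++ [a, b]).length : Int) - 1) "" = b := by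
      rw [PySem.List.pyGetD_eq_getElem _ _ (by rw [hlen]; push_cast; omega) (by omega)]
      have ht : (((l.reverse ++ [a, b]).length : Int) - 1).toNat = l.reverse.length + 1 := by
        rw [hlen]; simp; omega
      simp only [ht]
      rw [List.getElem_append_right (by omega)]
      simp
    have hr : PySem.List.pyRange (((l.reverse ++ [a, b]).length : Int) - 1)
        (max (-1) (((l.reverse ++ [a, b]).length : Int) - 3)) (-1) =
        [((l.reverse ++ [a, b]).length : Int) - 1, ((l.reverse ++ [a, b]).length : Int) - 2] := by
      rw [show (max (-1) (((l.reverse ++ [a, b]).length : Int) - 3)) = ((l.reverse ++ [a, b]).length : Int) - 3 by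
        rw [hlen]; push_cast; omega]
      rw [PySem.List.pyRange_neg_one_cons (by rw [hlen]; push_cast; omega)]
      rw [show (((l.reverse ++ [a, b]).length : Int) - 1 - 1) = ((l.reverse ++ [a, b]).length : Int) - 2 by ring]
      rw [PySem.List.pyRange_neg_one_cons (by rw [hlen]; push_cast; omega)]
      rw [show (((l.reverse ++ [a, b]).length : Int) - 2 - 1) = ((l.reverse ++ [a, b]).length : Int) - 3 by ring]
      rw [PySem.List.pyRange_neg_one_eq_nil (by omega)]
    have hdrop : List.drop ((l.reverse ++ [a, b]).length - 2) (l.reverse ++ [a, b]) = [a, b] := by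
      rw [hlen, show l.length + 2 - 2 = l.reverse.length by simp, List.drop_left]
    rw [hr, hdrop]
    simp only [pvALoop, pvBStep, hga, hgb, List.foldl_cons, List.foldl_nil]
    cases h1 : tickers.any (fun t => PySem.Str.isIn t b) <;>
      cases h2 : pvFirstUpper b <;>
        cases h3 : tickers.any (fun t => PySem.Str.isIn t a) <;>
          cases h4 : pvFirstUpper a <;>
            simp [pvALoop, hga, h1, h2, h3, h4]

-- ===== VERDICT (by name: the statement is the Claim_ definition above) =====
theorem get_company_names_spec : Claim_equal_get_company_names := by
  intro tickers s _
  unfold Spec_get_company_names get_company_names get_company_names_alt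
  rw [PySem.List.foldl_append_singleton_eq_map
    (fun ticker => PySem.Str.join " "
      (pvALoop tickers (PySem.List.slice (PySem.Str.split₀ s) none (some (pvGtiAux ticker (PySem.Str.split₀ s) 0)))
        (PySem.List.pyRange (((PySem.List.slice (PySem.Str.split₀ s) none (some (pvGtiAux ticker (PySem.Str.split₀ s) 0))).length : Int) - 1)
          (max (-1) (((PySem.List.slice (PySem.Str.split₀ s) none (some (pvGtiAux ticker (PySem.Str.split₀ s) 0))).length : Int) - 3)) (-1)) []).reverse)]
  simp only [List.nil_append]
  apply List.map_congr_left
  intro ticker _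
  rw [pvCore_eq]
  unfold pvNameBefore pvNextIdx
  rw [pvGti_eq_nextIdx]
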